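-- pv_equiv track=rewrite | github.com/leighfall/aes.py | Project1AES.py | rotWord
-- ===== SOURCE A (Python) =====
-- def rotWord(fourByteInput):
--     output = 0x00
--     leftMostByte = (fourByteInput & 0xFF000000) >> 24
--     mask = 0xFF0000
--     shift = 16
--
--     for i in range(3):
--         byte = (fourByteInput & mask) >> shift
--         output = (output << 8) ^ byte
--         mask >>= 8
--         shift -= 8
--
--     output = (output << 8) ^ leftMostByte
--     return output
-- ===== SOURCE B (Python) =====
-- def rotWord(fourByteInput):
--     # Closed-form rotate-left-by-8 of the low 32 bits: the low 24 bits move up one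
--     # byte and the top byte of the low 32-bit word moves to the bottom.
--     return (fourByteInput % 0x1000000) * 256 + (fourByteInput % 0x100000000) // 0x1000000
-- ===== Notes on version B (the rewrite author's own statement) =====
-- stated objective: simpler
-- what changed: Replaces the per-byte extraction loop with mutating mask/shift state and xor-assembly by a single closed-form arithmetic expression: the low three bytes shifted up one byte plus the top byte of the low word.
import Mathlib
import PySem

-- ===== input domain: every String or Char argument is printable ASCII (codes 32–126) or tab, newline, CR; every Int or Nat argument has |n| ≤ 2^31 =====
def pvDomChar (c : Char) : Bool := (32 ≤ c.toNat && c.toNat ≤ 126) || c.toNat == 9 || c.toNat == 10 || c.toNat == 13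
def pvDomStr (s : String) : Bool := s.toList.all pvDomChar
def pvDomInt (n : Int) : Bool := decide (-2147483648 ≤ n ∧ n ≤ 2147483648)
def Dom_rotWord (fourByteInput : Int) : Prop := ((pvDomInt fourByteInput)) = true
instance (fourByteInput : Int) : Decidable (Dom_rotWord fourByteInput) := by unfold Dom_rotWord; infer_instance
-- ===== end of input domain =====

-- B replaces A's 3-iteration byte-extraction loop by one closed-form arithmetic expression (objective: simpler).

-- ===== PORT A =====
-- Python's `shift` stays in {16, 8, 0}, so it is tracked as a Nat (exact here);
-- `&`, `^`, `>>`, `<<` are PySem.Int.band / bxor and core <<< / >>> (Python-exact).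
def rotWord (fourByteInput : Int) : Int :=
  let leftMostByte : Int := PySem.Int.band fourByteInput 0xFF000000 >>> (24 : Nat)
  let st := (PySem.List.pyRange 0 3 1).foldl
    (fun (st : Int × Int × Nat) _ =>
      let byte := PySem.Int.band fourByteInput st.2.1 >>> st.2.2
      (PySem.Int.bxor (st.1 <<< (8 : Nat)) byte, st.2.1 >>> (8 : Nat), st.2.2 - 8))
    ((0 : Int), (0xFF0000 : Int), (16 : Nat))
  PySem.Int.bxor (st.1 <<< (8 : Nat)) leftMostByte

-- ===== PORT B =====
def rotWord_alt (fourByteInput : Int) : Int :=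
  PySem.Int.mod fourByteInput 0x1000000 * 256
    + PySem.Int.floordiv (PySem.Int.mod fourByteInput 0x100000000) 0x1000000

-- ===== PRECONDITION & SPEC =====
def Spec_rotWord (fourByteInput : Int) (out : Int) : Prop := out = rotWord_alt fourByteInput
instance (fourByteInput : Int) (out : Int) : Decidable (Spec_rotWord fourByteInput out) := by unfold Spec_rotWord; infer_instance

-- ===== CLAIM (what is proved, stated in full; the proofs are below) =====
def Claim_equal_rotWord : Prop := ∀ (fourByteInput : Int), Dom_rotWord fourByteInput → Spec_rotWord fourByteInput (rotWord fourByteInput)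

-- ===== LEMMAS AND PROOFS =====

-- `n AND (0xFF << s)` keeps exactly byte s of n (Nat level).
theorem nat_and_byte (n s : Nat) : n &&& (255 * 2^s) = (n / 2^s % 256) * 2^s := by
  apply Nat.eq_of_testBit_eq
  intro j
  rw [show (255 : Nat) * 2^s = (2^8-1) <<< s by rw [Nat.shiftLeft_eq]; norm_num]
  rw [show (n / 2^s % 256) * 2^s = ((n >>> s) % 2^8) <<< s by
    rw [Nat.shiftLeft_eq, Nat.shiftRight_eq_div_pow]; norm_num]
  simp only [Nat.testBit_and, Nat.testBit_shiftLeft, Nat.testBit_two_pow_sub_one,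
    Nat.testBit_mod_two_pow, Nat.testBit_shiftRight]
  by_cases h : s ≤ j
  · by_cases h2 : j - s < 8 <;> simp [h, h2, ge_iff_le, Nat.add_sub_cancel' h]
  · simp [h, ge_iff_le]

-- Python's `(x & (0xFF << s)) >> s` is the s-th byte `(x >> s) mod 256`, for EVERY Int x.
theorem band_byte (x : Int) (s : Nat) :
    PySem.Int.band x (255 * 2^s) >>> s = (x >>> s) % 256 := by
  have hcast : (255 * 2^s : Int) = ((255 * 2^s : Nat) : Int) := by push_cast; ring
  by_cases hx : 0 ≤ x
  · rw [PySem.Int.band_of_nonneg hx (by positivity), hcast, Int.toNat_natCast, nat_and_byte]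
    rw [← Int.natCast_shiftRight, Nat.shiftRight_eq_div_pow, Nat.mul_div_cancel _ (by positivity)]
    conv_rhs => rw [← Int.toNat_of_nonneg hx]
    rw [← Int.natCast_shiftRight, Nat.shiftRight_eq_div_pow]
    push_cast
    rfl
  · have hb : PySem.Int.band x ((255 * 2^s : Nat) : Int)
        = (((255 * 2^s : Nat) - ((-x - 1).toNat &&& (255 * 2^s : Nat)) : Nat) : Int) := by
      simp [PySem.Int.band, hx]
      rw [hcast, Int.toNat_natCast, Nat.and_comm]
    rw [hcast, hb, nat_and_byte]
    set k := (-x - 1).toNat with hk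
    have hxk : x = -(k : Int) - 1 := by simp only [hk]; omega
    set d := k / 2^s % 256 with hd
    have hdlt : d < 256 := Nat.mod_lt _ (by norm_num)
    have h1 : (255 * 2^s - d * 2^s : Nat) = (255 - d) * 2^s := by rw [Nat.sub_mul]
    rw [h1, ← Int.natCast_shiftRight, Nat.shiftRight_eq_div_pow,
      Nat.mul_div_cancel _ (by positivity)]
    rw [Int.shiftRight_eq_div_pow, hxk]
    have hq : (-(k:Int) - 1) / ((2^s : Nat) : Int) = -((k / 2^s : Nat) : Int) - 1 := by
      have := (Int.ediv_emod_unique (a := -(k:Int) - 1) (b := ((2^s : Nat) : Int))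
        (q := -((k / 2^s : Nat) : Int) - 1)
        (r := ((2^s : Nat) : Int) - 1 - ((k % 2^s : Nat) : Int)) (by positivity)).mpr
      have hmod : (k % 2^s : Nat) + 2^s * (k / 2^s) = k := by
        rw [Nat.mod_add_div]
      refine (this ?_).1
      refine ⟨by push_cast; linarith, ?_, ?_⟩
      · have : (k % 2^s : Nat) < 2^s := Nat.mod_lt _ (by positivity)
        push_cast; omega
      · have : (k % 2^s : Nat) < 2^s := Nat.mod_lt _ (by positivity)
        push_cast; omega
    rw [hq]
    omega

theorem nat_testBit_mul256_add (a b j : Nat) (hb : b < 256) :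
    (a * 256 + b).testBit j = if j < 8 then b.testBit j else a.testBit (j - 8) := by
  by_cases h : j < 8
  · simp only [h, if_true]
    rw [Nat.testBit_eq_decide_div_mod_eq, Nat.testBit_eq_decide_div_mod_eq]
    interval_cases j <;> (norm_num; try omega)
  · simp only [h, if_false]
    have h8 : (a * 256 + b) >>> 8 = a := by
      rw [Nat.shiftRight_eq_div_pow]; omega
    have : j = 8 + (j - 8) := by omega
    rw [this, ← Nat.testBit_shiftRight, h8]
    congr 1
    omega

theorem nat_xor_add (a b : Nat) (hb : b < 256) : (a * 256) ^^^ b = a * 256 + b := by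
  apply Nat.eq_of_testBit_eq
  intro j
  rw [nat_testBit_mul256_add a b j hb, Nat.testBit_xor,
    show a * 256 = a <<< 8 by rw [Nat.shiftLeft_eq], Nat.testBit_shiftLeft]
  by_cases h : j < 8
  · simp [h, show ¬ (j ≥ 8) by omega]
  · have hbj : b.testBit j = false :=
      Nat.testBit_eq_false_of_lt (lt_of_lt_of_le hb (by
        calc (256:Nat) = 2^8 := by norm_num
        _ ≤ 2^j := Nat.pow_le_pow_right (by norm_num) (by omega)))
    simp [h, show j ≥ 8 by omega, hbj]

-- Python's `(output << 8) ^ byte` is `output * 256 + byte` when the byte is in [0, 256).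
theorem int_xor_add (a b : Int) (ha : 0 ≤ a) (hb0 : 0 ≤ b) (hb : b < 256) :
    PySem.Int.bxor (a <<< (8:Nat)) b = a * 256 + b := by
  have hs : a <<< (8:Nat) = a * 256 := by
    rw [Int.shiftLeft_eq]; norm_num
  rw [hs, PySem.Int.bxor_of_nonneg (by positivity) hb0]
  rw [show (a * 256).toNat = a.toNat * 256 by omega]
  rw [nat_xor_add _ _ (by omega)]
  omega

-- Specializations of band_byte to A's four literal masks, with the shift written as ediv.
theorem byte24 (x : Int) : PySem.Int.band x 0xFF000000 >>> (24:Nat) = x / 16777216 % 256 := by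
  rw [show (0xFF000000 : Int) = 255 * 2^24 from by norm_num, band_byte,
    Int.shiftRight_eq_div_pow]; norm_num
theorem byte16 (x : Int) : PySem.Int.band x 0xFF0000 >>> (16:Nat) = x / 65536 % 256 := by
  rw [show (0xFF0000 : Int) = 255 * 2^16 from by norm_num, band_byte,
    Int.shiftRight_eq_div_pow]; norm_num
theorem byte8 (x : Int) : PySem.Int.band x 0xFF00 >>> (8:Nat) = x / 256 % 256 := by
  rw [show (0xFF00 : Int) = 255 * 2^8 from by norm_num, band_byte,
    Int.shiftRight_eq_div_pow]; norm_num
theorem byte0 (x : Int) : PySem.Int.band x 0xFF >>> (0:Nat) = x % 256 := by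
  rw [show (0xFF : Int) = 255 * 2^0 from by norm_num, band_byte,
    Int.shiftRight_eq_div_pow]; norm_num

-- ===== VERDICT (by name: the statement is the Claim_ definition above) =====
theorem rotWord_spec : Claim_equal_rotWord := by
  intro x _
  unfold Spec_rotWord rotWord rotWord_alt
  rw [show PySem.List.pyRange 0 3 1 = [0, 1, 2] from by decide]
  simp only [List.foldl]
  rw [show ((0xFF0000 : Int) >>> (8:Nat)) = 0xFF00 from by decide,
      show ((0xFF00 : Int) >>> (8:Nat)) = 0xFF from by decide,
      show ((16:Nat) - 8) = 8 from rfl, show ((8:Nat) - 8) = 0 from rfl]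
  rw [byte16, byte8, byte0, byte24]
  have e2 := Int.emod_nonneg (x / 65536) (by norm_num : (256:Int) ≠ 0)
  have l2 := Int.emod_lt_of_pos (x / 65536) (by norm_num : (0:Int) < 256)
  have e1 := Int.emod_nonneg (x / 256) (by norm_num : (256:Int) ≠ 0)
  have l1 := Int.emod_lt_of_pos (x / 256) (by norm_num : (0:Int) < 256)
  have e0 := Int.emod_nonneg x (by norm_num : (256:Int) ≠ 0)
  have l0 := Int.emod_lt_of_pos x (by norm_num : (0:Int) < 256)
  have e3 := Int.emod_nonneg (x / 16777216) (by norm_num : (256:Int) ≠ 0)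
  have l3 := Int.emod_lt_of_pos (x / 16777216) (by norm_num : (0:Int) < 256)
  rw [int_xor_add _ _ (by norm_num) e2 l2,
      int_xor_add _ _ (by positivity) e1 l1,
      int_xor_add _ _ (by positivity) e0 l0,
      int_xor_add _ _ (by positivity) e3 l3]
  rw [show PySem.Int.mod x 0x1000000 = x % 16777216 from by
        rw [PySem.Int.mod, Int.fmod_eq_emod]; norm_num,
      show PySem.Int.mod x 0x100000000 = x % 4294967296 from by
        rw [PySem.Int.mod, Int.fmod_eq_emod]; norm_num,
      show PySem.Int.floordiv (x % 4294967296) 0x1000000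
          = (x % 4294967296) / 16777216 from by
        rw [PySem.Int.floordiv, Int.fdiv_eq_ediv]; norm_num]
  omega
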